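-- pv_equiv track=rewrite | github.com/SuanmoSuanyangTechnology/MemoryBear | api/app/core/memory/agent/utils/messages_tools.py | reorder_output_results
-- ===== SOURCE A (Python) =====
-- from typing import List, Dict, Any
--
-- def reorder_output_results(results: List[Dict[str, Any]]) -> List[Dict[str, Any]]:
--     """
--     重新排序输出结果，将 retrieval_summary 类型的数据放到最后面
--
--     Args:
--         results: 原始输出结果列表
--
--     Returns:
--         重新排序后的结果列表
--     """
--     retrieval_summaries = []
--     other_results = []
--
--     # 分离 retrieval_summary 和其他类型的结果
--     for result in results:
--         if 'summary' in result.get('type'):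
--             retrieval_summaries.append(result)
--         else:
--             other_results.append(result)
--
--     # 将 retrieval_summary 放到最后
--     return other_results + retrieval_summaries
-- ===== SOURCE B (Python) =====
-- from typing import List, Dict, Any
--
-- def reorder_output_results(results: List[Dict[str, Any]]) -> List[Dict[str, Any]]:
--     # One stable sort keyed on the summary predicate: False (non-summary) sorts
--     # before True (summary), and stability preserves each group's original order.
--     return sorted(results, key=lambda r: 'summary' in r.get('type'))
-- ===== Notes on version B (the rewrite author's own statement) =====
-- stated objective: idiomatic
-- what changed: Replaces the two-bucket partition loop and concatenation with a single stable sort keyed on the boolean 'summary-in-type' predicate; stability makes the keyed sort reproduce the partition order exactly.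
import Mathlib
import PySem

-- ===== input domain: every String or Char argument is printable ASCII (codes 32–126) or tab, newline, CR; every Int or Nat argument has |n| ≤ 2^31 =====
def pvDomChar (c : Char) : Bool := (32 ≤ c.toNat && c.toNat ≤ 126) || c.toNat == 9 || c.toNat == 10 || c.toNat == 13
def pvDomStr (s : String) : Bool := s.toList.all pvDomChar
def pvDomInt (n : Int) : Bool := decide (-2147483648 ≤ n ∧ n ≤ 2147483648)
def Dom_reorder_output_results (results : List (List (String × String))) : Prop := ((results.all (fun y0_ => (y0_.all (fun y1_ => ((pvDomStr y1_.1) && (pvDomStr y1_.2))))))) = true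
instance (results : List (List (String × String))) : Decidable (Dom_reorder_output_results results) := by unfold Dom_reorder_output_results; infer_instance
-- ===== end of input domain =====

-- B replaces A's two-bucket partition loop with one stable sort keyed on the summary predicate (idiomatic, not faster).

-- shared reading of Python's `'summary' in r.get('type')` (value under Pre_ is present; getD "" is never hit there)
def pvIsSummary (r : List (String × String)) : Bool :=
  PySem.Str.isIn "summary" (((PySem.Dict.ofList r).get? "type").getD "")

-- ===== PORT A =====
def reorder_output_results (results : List (List (String × String))) : List (List (String × String)) :=
  let acc := results.foldl
    (fun (acc : List (List (String × String)) × List (List (String × String))) result =>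
      if pvIsSummary result then (acc.1, acc.2 ++ [result]) else (acc.1 ++ [result], acc.2))
    ([], [])
  acc.1 ++ acc.2

-- ===== PORT B =====
def reorder_output_results_alt (results : List (List (String × String))) : List (List (String × String)) :=
  PySem.List.sorted results (fun r => pvIsSummary r)

-- ===== PRECONDITION & SPEC =====
-- Pre_ excludes exactly the inputs where some dict lacks a 'type' key: there r.get('type') is None and A raises TypeError.
def Pre_reorder_output_results (results : List (List (String × String))) : Prop :=
  ∀ r ∈ results, ((PySem.Dict.ofList r).get? "type").isSome = true
instance (results : List (List (String × String))) : Decidable (Pre_reorder_output_results results) := by unfold Pre_reorder_output_results; infer_instance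
def pvWitness_reorder_output_results : (List (List (String × String))) :=
  [[("type", "retrieval_summary"), ("text", "a")], [("type", "note"), ("text", "b")]]
def Spec_reorder_output_results (results : List (List (String × String))) (out : List (List (String × String))) : Prop := out = reorder_output_results_alt results
instance (results : List (List (String × String))) (out : List (List (String × String))) : Decidable (Spec_reorder_output_results results out) := by unfold Spec_reorder_output_results; infer_instance

-- ===== CLAIM (what is proved, stated in full; the proofs are below) =====
def Claim_equal_reorder_output_results : Prop := ∀ (results : List (List (String × String))), Dom_reorder_output_results results → Pre_reorder_output_results results → Spec_reorder_output_results results (reorder_output_results results)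

-- ===== LEMMAS AND PROOFS =====

-- inserting a non-summary element into (non-summaries ++ summaries) puts it right before the summaries
theorem pv_insert_false (x : List (String × String)) (os ss : List (List (String × String)))
    (hos : ∀ a ∈ os, pvIsSummary a = false) (hss : ∀ a ∈ ss, pvIsSummary a = true)
    (hx : pvIsSummary x = false) :
    PySem.List.insertBy (fun a b => decide (pvIsSummary a < pvIsSummary b)) x (os ++ ss)
      = (os ++ [x]) ++ ss := by
  induction os with
  | nil =>
    cases ss with
    | nil => simp [PySem.List.insertBy]
    | cons y ys =>
      have hy := hss y (by simp)
      simp [PySem.List.insertBy, hx, hy]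
  | cons o os ih =>
    have ho := hos o (by simp)
    have : decide (pvIsSummary x < pvIsSummary o) = false := by rw [hx, ho]; decide
    simp only [List.cons_append, PySem.List.insertBy, this, Bool.false_eq_true, if_false]
    rw [ih (fun a ha => hos a (by simp [ha]))]

-- inserting a summary element appends it at the very end
theorem pv_insert_true (x : List (String × String)) (ys : List (List (String × String)))
    (hx : pvIsSummary x = true) :
    PySem.List.insertBy (fun a b => decide (pvIsSummary a < pvIsSummary b)) x ys = ys ++ [x] := by
  apply PySem.List.insertBy_of_forall_not_before
  intro y _
  rw [hx]
  cases h : pvIsSummary y <;> decide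

-- loop invariant: A's partition fold and B's insertion fold build the same list
theorem pv_loop (results : List (List (String × String))) (os ss : List (List (String × String)))
    (hos : ∀ a ∈ os, pvIsSummary a = false) (hss : ∀ a ∈ ss, pvIsSummary a = true) :
    (results.foldl
      (fun (acc : List (List (String × String)) × List (List (String × String))) result =>
        if pvIsSummary result then (acc.1, acc.2 ++ [result]) else (acc.1 ++ [result], acc.2))
      (os, ss)).1 ++
    (results.foldl
      (fun (acc : List (List (String × String)) × List (List (String × String))) result =>
        if pvIsSummary result then (acc.1, acc.2 ++ [result]) else (acc.1 ++ [result], acc.2))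
      (os, ss)).2
      = results.foldl
          (fun acc x => PySem.List.insertBy (fun a b => decide (pvIsSummary a < pvIsSummary b)) x acc)
          (os ++ ss) := by
  induction results generalizing os ss with
  | nil => simp
  | cons r rs ih =>
    simp only [List.foldl_cons]
    cases hr : pvIsSummary r with
    | false =>
      rw [pv_insert_false r os ss hos hss hr]
      simp only [hr, Bool.false_eq_true, if_false]
      exact ih (os ++ [r]) ss
        (by intro a ha; rcases List.mem_append.mp ha with h | h
            · exact hos a h
            · simp at h; subst h; exact hr) hss
    | true =>
      rw [pv_insert_true r (os ++ ss) hr]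
      simp only [hr, if_true]
      rw [List.append_assoc]
      exact ih os (ss ++ [r]) hos
        (by intro a ha; rcases List.mem_append.mp ha with h | h
            · exact hss a h
            · simp at h; subst h; exact hr)

-- ===== VERDICT (by name: the statement is the Claim_ definition above) =====
theorem reorder_output_results_spec : Claim_equal_reorder_output_results := by
  intro results _ _
  unfold Spec_reorder_output_results reorder_output_results reorder_output_results_alt
  rw [PySem.List.sorted_eq_foldl_insertBy]
  exact pv_loop results [] [] (by simp) (by simp)
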